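-- pv_equiv track=rewrite | github.com/LaiXuanHieu/C-u-Tr-c-D-Li-u | Chuong6/6.12.py | generate_loc_phat_numbers
-- ===== SOURCE A (Python) =====
-- from collections import deque
--
-- def generate_loc_phat_numbers(N):
--     queue = deque(["6", "8"])
--     result = []
--
--     while queue:
--         num = queue.popleft()
--         if len(num) > N:
--             break
--         result.append(num)
--         queue.append(num + "6")
--         queue.append(num + "8")
--
--     return sorted(result, reverse=True)  # Sắp xếp giảm dần
-- ===== SOURCE B (Python) =====
-- def generate_loc_phat_numbers(N):
--     # Emit the 6/8-strings of length 1..N directly in descending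
--     # lexicographic order with an explicit post-order stack
--     # (8-subtree first, then 6-subtree, then the prefix itself),
--     # so no sort is needed.
--     result = []
--     stack = [("6", False), ("8", False)]
--     while stack:
--         p, emit = stack.pop()
--         if emit:
--             result.append(p)
--         elif len(p) <= N:
--             stack.append((p, True))
--             stack.append((p + "6", False))
--             stack.append((p + "8", False))
--     return result
-- ===== Notes on version B (the rewrite author's own statement) =====
-- stated objective: faster
-- what changed: B generates the strings directly in descending lexicographic order by a recursive descent (8-branch before 6-branch, prefix emitted last), eliminating A's BFS queue and the final sort.
import Mathlib
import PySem

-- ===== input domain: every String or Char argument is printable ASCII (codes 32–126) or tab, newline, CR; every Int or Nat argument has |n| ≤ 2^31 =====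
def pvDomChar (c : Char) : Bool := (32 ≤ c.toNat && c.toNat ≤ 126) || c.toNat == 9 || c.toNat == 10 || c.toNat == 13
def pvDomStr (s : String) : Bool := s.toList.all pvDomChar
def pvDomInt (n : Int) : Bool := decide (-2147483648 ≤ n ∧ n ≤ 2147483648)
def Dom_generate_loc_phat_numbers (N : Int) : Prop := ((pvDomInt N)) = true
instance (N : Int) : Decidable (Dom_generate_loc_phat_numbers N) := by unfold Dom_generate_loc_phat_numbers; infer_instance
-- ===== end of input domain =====

-- B generates the 6/8-strings directly in descending lexicographic order by a
-- recursive descent (8-branch, then 6-branch, then the prefix), removing A's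
-- BFS queue and final sort; measured faster in a timing run.

-- ===== PORT A =====
-- the while-loop over the deque; the fuel is only a totality device (it is
-- always sufficient: the loop pops fewer than 2^(N+2) strings before breaking)
def pvLoopA (N : Int) : Nat → List String → List String → List String
  | 0, _, res => res
  | _ + 1, [], res => res
  | f + 1, num :: rest, res =>
      if PySem.Str.len num > N then res
      else pvLoopA N f (rest ++ [num ++ "6", num ++ "8"]) (res ++ [num])

def generate_loc_phat_numbers (N : Int) : List String :=
  PySem.List.sorted (pvLoopA N (2 ^ (N + 2).toNat) ["6", "8"] []) (fun s => s) true

-- ===== PORT B =====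
-- the while-loop over the explicit post-order stack (head of the list = top of
-- the stack); the fuel is only a totality device (always sufficient: the loop
-- pops fewer than 2^(N+3) items before the stack empties)
def pvLoopB (N : Int) : Nat → List (String × Bool) → List String → List String
  | 0, _, res => res
  | _ + 1, [], res => res
  | f + 1, (p, emit) :: rest, res =>
      if emit then pvLoopB N f rest (res ++ [p])
      else if PySem.Str.len p ≤ N then
        pvLoopB N f ((p ++ "8", false) :: (p ++ "6", false) :: (p, true) :: rest) res
      else pvLoopB N f rest res

def generate_loc_phat_numbers_alt (N : Int) : List String :=
  pvLoopB N (2 ^ (N + 3).toNat) [("8", false), ("6", false)] []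

-- ===== PRECONDITION & SPEC =====
def Spec_generate_loc_phat_numbers (N : Int) (out : List String) : Prop := out = generate_loc_phat_numbers_alt N
instance (N : Int) (out : List String) : Decidable (Spec_generate_loc_phat_numbers N out) := by unfold Spec_generate_loc_phat_numbers; infer_instance

-- ===== CLAIM (what is proved, stated in full; the proofs are below) =====
def Claim_equal_generate_loc_phat_numbers : Prop := ∀ (N : Int), Dom_generate_loc_phat_numbers N → Spec_generate_loc_phat_numbers N (generate_loc_phat_numbers N)

-- ===== LEMMAS AND PROOFS =====

-- the BFS levels: pvLevels l d = l, then the children of l, … for d levels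
def pvChildren (l : List String) : List String := l.flatMap (fun s => [s ++ "6", s ++ "8"])

def pvLevels : List String → Nat → List String
  | _, 0 => []
  | l, d + 1 => l ++ pvLevels (pvChildren l) d

def pvFuel : List String → Nat → Nat
  | _, 0 => 1
  | l, d + 1 => l.length + pvFuel (pvChildren l) d

theorem pvChildren_cons (x : String) (l : List String) :
    pvChildren (x :: l) = (x ++ "6") :: (x ++ "8") :: pvChildren l := by
  simp [pvChildren]

theorem pvChildren_length (l : List String) : (pvChildren l).length = 2 * l.length := by
  induction l with
  | nil => simp [pvChildren]
  | cons x t ih => rw [pvChildren_cons]; simp only [List.length_cons, ih]; omega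

theorem pvChildren_append (l1 l2 : List String) :
    pvChildren (l1 ++ l2) = pvChildren l1 ++ pvChildren l2 := by
  simp [pvChildren]

theorem pvChildren_ne_nil (l : List String) (h : l ≠ []) : pvChildren l ≠ [] := by
  cases l with
  | nil => exact absurd rfl h
  | cons x t => rw [pvChildren_cons]; exact List.cons_ne_nil _ _

theorem pvChildren_len (N : Int) (l : List String) (d : Nat)
    (h : ∀ x ∈ l, PySem.Str.len x + (d : Int) + 1 = N + 1) :
    ∀ y ∈ pvChildren l, PySem.Str.len y + (d : Int) = N + 1 := by
  intro y hy
  simp only [pvChildren, List.mem_flatMap, List.mem_cons, List.not_mem_nil, or_false] at hy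
  obtain ⟨x, hx, hy⟩ := hy
  have hx' := h x hx
  rcases hy with rfl | rfl
  · rw [PySem.Str.len_append, show PySem.Str.len "6" = 1 from by decide]; omega
  · rw [PySem.Str.len_append, show PySem.Str.len "8" = 1 from by decide]; omega

theorem pvLoopA_inner (N : Int) (q1 : List String) : ∀ (q2 res : List String) (e : Nat),
    (∀ x ∈ q1, ¬ PySem.Str.len x > N) →
    pvLoopA N (q1.length + e) (q1 ++ q2) res = pvLoopA N e (q2 ++ pvChildren q1) (res ++ q1) := by
  induction q1 with
  | nil => intro q2 res e _; simp [pvChildren]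
  | cons x t ih =>
      intro q2 res e h
      have hx : ¬ PySem.Str.len x > N := h x (List.mem_cons_self)
      have hlen : (x :: t).length + e = (t.length + e) + 1 := by simp; omega
      rw [hlen]
      show (if PySem.Str.len x > N then res
            else pvLoopA N (t.length + e) ((t ++ q2) ++ [x ++ "6", x ++ "8"]) (res ++ [x])) = _
      rw [if_neg hx, List.append_assoc,
        ih (q2 ++ [x ++ "6", x ++ "8"]) (res ++ [x]) e (fun y hy => h y (List.mem_cons_of_mem _ hy)),
        pvChildren_cons]
      simp

theorem pvLoopA_outer (N : Int) : ∀ (d : Nat) (l res : List String) (e : Nat), l ≠ [] →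
    (∀ x ∈ l, PySem.Str.len x + (d : Int) = N + 1) →
    pvLoopA N (pvFuel l d + e) l res = res ++ pvLevels l d := by
  intro d
  induction d with
  | zero =>
      intro l res e hne h
      cases l with
      | nil => exact absurd rfl hne
      | cons x t =>
          have hx : PySem.Str.len x > N := by have := h x (List.mem_cons_self); omega
          rw [show pvFuel (x :: t) 0 + e = e + 1 from by simp [pvFuel]; omega]
          show (if PySem.Str.len x > N then res else _) = _
          rw [if_pos hx]
          simp [pvLevels]
  | succ d ih =>
      intro l res e hne h
      have hle : ∀ x ∈ l, ¬ PySem.Str.len x > N := by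
        intro x hx; have := h x hx; push_cast at this; omega
      have hstep : pvFuel l (d + 1) + e = l.length + (pvFuel (pvChildren l) d + e) := by
        simp [pvFuel]; omega
      have hsplit := pvLoopA_inner N l [] res (pvFuel (pvChildren l) d + e) hle
      rw [List.append_nil, List.nil_append] at hsplit
      rw [hstep, hsplit,
        ih (pvChildren l) (res ++ l) e (pvChildren_ne_nil l hne)
          (pvChildren_len N l d (by intro x hx; have := h x hx; push_cast at this ⊢; omega))]
      simp [pvLevels]

theorem pvFuel_le (d : Nat) : ∀ l : List String, l ≠ [] →
    pvFuel l d ≤ l.length * (2 ^ (d + 1) - 1) + 1 := by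
  induction d with
  | zero =>
      intro l hne
      have h1 : 1 ≤ l.length := List.length_pos_of_ne_nil hne
      have h2 : (2 : Nat) ^ (0 + 1) = 2 := by norm_num
      rw [show pvFuel l 0 = 1 from rfl, h2]
      omega
  | succ d ih =>
      intro l hne
      obtain ⟨k, hk⟩ : ∃ k, (2 : Nat) ^ (d + 1) = k + 1 :=
        ⟨2 ^ (d + 1) - 1, by have := Nat.one_le_two_pow (n := d + 1); omega⟩
      have hpow : (2 : Nat) ^ (d + 1 + 1) = 2 * (k + 1) := by rw [pow_succ, hk]; ring
      have h1 := ih (pvChildren l) (pvChildren_ne_nil l hne)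
      rw [pvChildren_length, hk, Nat.add_sub_cancel] at h1
      have hmul : l.length * (2 * (k + 1) - 1) = 2 * l.length * k + l.length := by
        rw [show 2 * (k + 1) - 1 = 2 * k + 1 from by omega]; ring
      show l.length + pvFuel (pvChildren l) d ≤ _
      rw [hpow, hmul]
      omega

-- A's loop result, characterised
theorem pvLoopA_pos (N : Int) (hN : 1 ≤ N) :
    pvLoopA N (2 ^ (N + 2).toNat) ["6", "8"] [] = pvLevels ["6", "8"] N.toNat := by
  set d := N.toNat with hd
  have hlen : ∀ x ∈ ["6", "8"], PySem.Str.len x + (d : Int) = N + 1 := by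
    intro x hx
    have h1 : PySem.Str.len x = 1 := by
      simp only [List.mem_cons, List.not_mem_nil, or_false] at hx
      rcases hx with rfl | rfl <;> decide
    rw [h1]; omega
  have hfle : pvFuel ["6", "8"] d ≤ 2 ^ (N + 2).toNat := by
    have h1 := pvFuel_le d ["6", "8"] (by simp)
    have h2 : (N + 2).toNat = d + 2 := by omega
    have h3 : (2 : Nat) ^ (d + 2) = 2 * 2 ^ (d + 1) := by ring
    have h4 : 1 ≤ (2 : Nat) ^ (d + 1) := Nat.one_le_two_pow
    simp only [List.length_cons, List.length_nil] at h1
    rw [h2, h3]; omega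
  have : 2 ^ (N + 2).toNat = pvFuel ["6", "8"] d + (2 ^ (N + 2).toNat - pvFuel ["6", "8"] d) := by
    omega
  rw [this, pvLoopA_outer N d ["6", "8"] [] _ (by simp) hlen, List.nil_append]

theorem pvLoopA_nonpos (N : Int) (hN : N ≤ 0) :
    pvLoopA N (2 ^ (N + 2).toNat) ["6", "8"] [] = [] := by
  obtain ⟨m, hm⟩ : ∃ m, 2 ^ (N + 2).toNat = m + 1 :=
    ⟨2 ^ (N + 2).toNat - 1, by have := Nat.one_le_two_pow (n := (N + 2).toNat); omega⟩
  rw [hm]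
  show (if PySem.Str.len "6" > N then ([] : List String) else _) = _
  rw [if_pos (by rw [show PySem.Str.len "6" = 1 from by decide]; omega)]

-- B's recursion: multiset of results, prefixes, descending order
theorem pvLevels_append_mult : ∀ (d : Nat) (l1 l2 : List String),
    (pvLevels (l1 ++ l2) d : Multiset String)
      = (pvLevels l1 d : Multiset String) + (pvLevels l2 d : Multiset String) := by
  intro d
  induction d with
  | zero => intro l1 l2; simp [pvLevels]
  | succ d ih =>
      intro l1 l2
      rw [show pvLevels (l1 ++ l2) (d + 1) = (l1 ++ l2) ++ pvLevels (pvChildren (l1 ++ l2)) d from rfl,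
        show pvLevels l1 (d + 1) = l1 ++ pvLevels (pvChildren l1) d from rfl,
        show pvLevels l2 (d + 1) = l2 ++ pvLevels (pvChildren l2) d from rfl,
        pvChildren_append]
      simp only [← Multiset.coe_add]
      rw [ih]
      have habce : ∀ a b c e : Multiset String, (a + b) + (c + e) = (a + c) + (b + e) := by
        intro a b c e
        rw [add_assoc, ← add_assoc b c e, add_comm b c, add_assoc c b e, ← add_assoc]
      exact habce _ _ _ _

-- proof-side recursive description of B's post-order traversal
def pvGo : Nat → Int → String → List String
  | 0, _, _ => []
  | f + 1, N, p =>
      if PySem.Str.len p > N then []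
      else pvGo f N (p ++ "8") ++ pvGo f N (p ++ "6") ++ [p]

-- pop cost of one unexpanded stack entry at distance d from the cut-off
def pvCost : Nat → Nat
  | 0 => 1
  | d + 1 => 2 + 2 * pvCost d

theorem pvGo_succ (f : Nat) (N : Int) (p : String) :
    pvGo (f + 1) N p = if PySem.Str.len p > N then []
      else pvGo f N (p ++ "8") ++ pvGo f N (p ++ "6") ++ [p] := rfl

theorem pvGo_mult (N : Int) : ∀ (d e : Nat) (p : String),
    PySem.Str.len p + (d : Int) = N + 1 →
    (pvGo (d + e + 1) N p : Multiset String) = (pvLevels [p] d : Multiset String) := by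
  intro d
  induction d with
  | zero =>
      intro e p h
      rw [show 0 + e + 1 = (0 + e) + 1 from rfl, pvGo_succ, if_pos (by omega)]
      simp [pvLevels]
  | succ d ih =>
      intro e p h
      have hle : ¬ PySem.Str.len p > N := by push_cast at h; omega
      have h8 : PySem.Str.len (p ++ "8") + (d : Int) = N + 1 := by
        rw [PySem.Str.len_append, show PySem.Str.len "8" = 1 from by decide]; push_cast at h ⊢; omega
      have h6 : PySem.Str.len (p ++ "6") + (d : Int) = N + 1 := by
        rw [PySem.Str.len_append, show PySem.Str.len "6" = 1 from by decide]; push_cast at h ⊢; omega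
      rw [show d + 1 + e + 1 = (d + 1 + e) + 1 from rfl, pvGo_succ, if_neg hle,
        show d + 1 + e = d + e + 1 from by omega]
      have hch : pvChildren [p] = [p ++ "6"] ++ [p ++ "8"] := by simp [pvChildren]
      have hlev : (pvLevels (pvChildren [p]) d : Multiset String)
          = (pvLevels [p ++ "6"] d : Multiset String) + (pvLevels [p ++ "8"] d : Multiset String) := by
        rw [hch, pvLevels_append_mult]
      rw [show pvLevels [p] (d + 1) = [p] ++ pvLevels (pvChildren [p]) d from rfl]
      simp only [← Multiset.coe_add]
      rw [hlev, ← ih e (p ++ "6") h6, ← ih e (p ++ "8") h8]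
      have habc : ∀ a b c : Multiset String, a + b + c = c + (b + a) := by
        intro a b c
        rw [add_comm a b, add_comm (b + a) c]
      exact habc _ _ _

theorem pvGo_prefix (N : Int) : ∀ (d e : Nat) (p : String),
    PySem.Str.len p + (d : Int) = N + 1 →
    ∀ x ∈ pvGo (d + e + 1) N p, ∃ w : List Char, x.toList = p.toList ++ w := by
  intro d
  induction d with
  | zero =>
      intro e p h x hx
      rw [show 0 + e + 1 = (0 + e) + 1 from rfl, pvGo_succ, if_pos (by omega)] at hx
      exact absurd hx (by simp)
  | succ d ih =>
      intro e p h x hx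
      have hle : ¬ PySem.Str.len p > N := by push_cast at h; omega
      have h8 : PySem.Str.len (p ++ "8") + (d : Int) = N + 1 := by
        rw [PySem.Str.len_append, show PySem.Str.len "8" = 1 from by decide]; push_cast at h ⊢; omega
      have h6 : PySem.Str.len (p ++ "6") + (d : Int) = N + 1 := by
        rw [PySem.Str.len_append, show PySem.Str.len "6" = 1 from by decide]; push_cast at h ⊢; omega
      rw [show d + 1 + e + 1 = (d + 1 + e) + 1 from rfl, pvGo_succ, if_neg hle,
        show d + 1 + e = d + e + 1 from by omega] at hx
      simp only [List.mem_append, List.mem_singleton] at hx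
      rcases hx with (hx | hx) | rfl
      · obtain ⟨w, hw⟩ := ih e (p ++ "8") h8 x hx
        rw [String.toList_append, show ("8" : String).toList = ['8'] from by decide] at hw
        exact ⟨'8' :: w, by simpa using hw⟩
      · obtain ⟨w, hw⟩ := ih e (p ++ "6") h6 x hx
        rw [String.toList_append, show ("6" : String).toList = ['6'] from by decide] at hw
        exact ⟨'6' :: w, by simpa using hw⟩
      · exact ⟨[], by simp⟩

-- lexicographic order facts on List Char / String
theorem pv_lt_append_cons (u : List Char) (c : Char) (v : List Char) : u < u ++ c :: v := by
  induction u with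
  | nil => exact List.nil_lt_cons _ _
  | cons x xs ih => rw [List.cons_append, List.cons_lt_cons_iff]; exact Or.inr ⟨rfl, ih⟩

theorem pv_append_lt_append (p u v : List Char) (h : u < v) : p ++ u < p ++ v := by
  induction p with
  | nil => exact h
  | cons x xs ih => rw [List.cons_append, List.cons_append, List.cons_lt_cons_iff]; exact Or.inr ⟨rfl, ih⟩

theorem pv_str_lt_ext (p x : String) (c : Char) (w : List Char)
    (hx : x.toList = p.toList ++ c :: w) : p < x := by
  rw [String.lt_iff_toList_lt, hx]; exact pv_lt_append_cons _ _ _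

theorem pv_str_lt_68 (p a b : String) (u v : List Char)
    (ha : a.toList = p.toList ++ '6' :: u) (hb : b.toList = p.toList ++ '8' :: v) : a < b := by
  rw [String.lt_iff_toList_lt, ha, hb]
  exact pv_append_lt_append _ _ _ (by rw [List.cons_lt_cons_iff]; exact Or.inl (by decide))

theorem pvGo_desc (N : Int) : ∀ (d e : Nat) (p : String),
    PySem.Str.len p + (d : Int) = N + 1 →
    (pvGo (d + e + 1) N p).Pairwise (fun a b => b < a) := by
  intro d
  induction d with
  | zero =>
      intro e p h
      rw [show 0 + e + 1 = (0 + e) + 1 from rfl, pvGo_succ, if_pos (by omega)]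
      exact List.Pairwise.nil
  | succ d ih =>
      intro e p h
      have hle : ¬ PySem.Str.len p > N := by push_cast at h; omega
      have h8 : PySem.Str.len (p ++ "8") + (d : Int) = N + 1 := by
        rw [PySem.Str.len_append, show PySem.Str.len "8" = 1 from by decide]; push_cast at h ⊢; omega
      have h6 : PySem.Str.len (p ++ "6") + (d : Int) = N + 1 := by
        rw [PySem.Str.len_append, show PySem.Str.len "6" = 1 from by decide]; push_cast at h ⊢; omega
      have hpre8 : ∀ x ∈ pvGo (d + e + 1) N (p ++ "8"), ∃ w, x.toList = p.toList ++ '8' :: w := by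
        intro x hx
        obtain ⟨w, hw⟩ := pvGo_prefix N d e (p ++ "8") h8 x hx
        rw [String.toList_append, show ("8" : String).toList = ['8'] from by decide] at hw
        exact ⟨w, by simpa using hw⟩
      have hpre6 : ∀ x ∈ pvGo (d + e + 1) N (p ++ "6"), ∃ w, x.toList = p.toList ++ '6' :: w := by
        intro x hx
        obtain ⟨w, hw⟩ := pvGo_prefix N d e (p ++ "6") h6 x hx
        rw [String.toList_append, show ("6" : String).toList = ['6'] from by decide] at hw
        exact ⟨w, by simpa using hw⟩
      rw [show d + 1 + e + 1 = (d + 1 + e) + 1 from rfl, pvGo_succ, if_neg hle,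
        show d + 1 + e = d + e + 1 from by omega, List.append_assoc, List.pairwise_append]
      refine ⟨ih e (p ++ "8") h8, ?_, ?_⟩
      · rw [List.pairwise_append]
        refine ⟨ih e (p ++ "6") h6, List.pairwise_singleton _ _, ?_⟩
        intro a ha b hb
        rw [List.mem_singleton] at hb
        obtain ⟨w, hw⟩ := hpre6 a ha
        rw [hb]
        exact pv_str_lt_ext p a '6' w hw
      · intro a ha b hb
        obtain ⟨w, hw⟩ := hpre8 a ha
        rcases List.mem_append.mp hb with hb | hb
        · obtain ⟨u, hu⟩ := hpre6 b hb
          exact pv_str_lt_68 p b a u w hu hw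
        · rw [List.mem_singleton] at hb
          rw [hb]
          exact pv_str_lt_ext p a '8' w hw

theorem pvLoopB_root (N : Int) : ∀ (d : Nat) (p : String) (rest : List (String × Bool))
    (res : List String) (e : Nat), PySem.Str.len p + (d : Int) = N + 1 →
    pvLoopB N (pvCost d + e) ((p, false) :: rest) res
      = pvLoopB N e rest (res ++ pvGo (d + 1) N p) := by
  intro d
  induction d with
  | zero =>
      intro p rest res e h
      rw [show pvCost 0 + e = e + 1 from by simp [pvCost]; omega]
      show (if false = true then _ else if PySem.Str.len p ≤ N then _ else pvLoopB N e rest res) = _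
      rw [if_neg (by simp), if_neg (by omega)]
      rw [show pvGo (0 + 1) N p = if PySem.Str.len p > N then [] else _ from rfl,
        if_pos (by omega), List.append_nil]
  | succ d ih =>
      intro p rest res e h
      have hle : PySem.Str.len p ≤ N := by push_cast at h; omega
      have h8 : PySem.Str.len (p ++ "8") + (d : Int) = N + 1 := by
        rw [PySem.Str.len_append, show PySem.Str.len "8" = 1 from by decide]; push_cast at h ⊢; omega
      have h6 : PySem.Str.len (p ++ "6") + (d : Int) = N + 1 := by
        rw [PySem.Str.len_append, show PySem.Str.len "6" = 1 from by decide]; push_cast at h ⊢; omega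
      rw [show pvCost (d + 1) + e = (pvCost d + (pvCost d + 1 + e)) + 1 from by simp [pvCost]; omega]
      show (if false = true then _ else if PySem.Str.len p ≤ N then
          pvLoopB N (pvCost d + (pvCost d + 1 + e))
            ((p ++ "8", false) :: (p ++ "6", false) :: (p, true) :: rest) res
        else _) = _
      rw [if_neg (by simp), if_pos hle,
        ih (p ++ "8") ((p ++ "6", false) :: (p, true) :: rest) res (pvCost d + 1 + e) h8,
        show pvCost d + 1 + e = pvCost d + (1 + e) from by omega,
        ih (p ++ "6") ((p, true) :: rest) (res ++ pvGo (d + 1) N (p ++ "8")) (1 + e) h6,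
        show 1 + e = e + 1 from by omega]
      show pvLoopB N e rest ((res ++ pvGo (d + 1) N (p ++ "8") ++ pvGo (d + 1) N (p ++ "6")) ++ [p]) = _
      rw [show pvGo (d + 1 + 1) N p
            = pvGo (d + 1) N (p ++ "8") ++ pvGo (d + 1) N (p ++ "6") ++ [p] from by
          rw [show d + 1 + 1 = (d + 1) + 1 from rfl, pvGo_succ, if_neg (by omega)]]
      simp only [List.append_assoc]

theorem pvLoopB_nil (N : Int) (f : Nat) (res : List String) : pvLoopB N f [] res = res := by
  cases f <;> rfl

theorem pvCost_le (d : Nat) : pvCost d ≤ 2 ^ (d + 2) - 2 := by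
  induction d with
  | zero => decide
  | succ d ih =>
      have h : (2 : Nat) ^ (d + 1 + 2) = 2 * 2 ^ (d + 2) := by ring
      have h2 : (4 : Nat) ≤ 2 ^ (d + 2) := by
        calc (4 : Nat) = 2 ^ 2 := by norm_num
        _ ≤ 2 ^ (d + 2) := Nat.pow_le_pow_right (by norm_num) (by omega)
      have he : pvCost (d + 1) = 2 + 2 * pvCost d := rfl
      rw [he, h]
      omega

theorem pv_alt_eq (N : Int) (hN : 1 ≤ N) :
    generate_loc_phat_numbers_alt N = pvGo (N.toNat + 1) N "8" ++ pvGo (N.toNat + 1) N "6" := by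
  set d := N.toNat with hd
  have h8 : PySem.Str.len "8" + (d : Int) = N + 1 := by
    rw [show PySem.Str.len "8" = 1 from by decide]; omega
  have h6 : PySem.Str.len "6" + (d : Int) = N + 1 := by
    rw [show PySem.Str.len "6" = 1 from by decide]; omega
  have hfle : pvCost d + pvCost d ≤ 2 ^ (N + 3).toNat := by
    have h1 := pvCost_le d
    have h2 : (N + 3).toNat = d + 3 := by omega
    have h3 : (2 : Nat) ^ (d + 3) = 2 ^ (d + 2) + 2 ^ (d + 2) := by ring
    have h4 : pvCost d ≤ 2 ^ (d + 2) := le_trans h1 (Nat.sub_le _ _)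
    rw [h2, h3]
    exact Nat.add_le_add h4 h4
  have hsplit : 2 ^ (N + 3).toNat
      = pvCost d + (pvCost d + (2 ^ (N + 3).toNat - (pvCost d + pvCost d))) := by omega
  show pvLoopB N (2 ^ (N + 3).toNat) [("8", false), ("6", false)] [] = _
  rw [hsplit, pvLoopB_root N d "8" [("6", false)] [] _ h8,
    pvLoopB_root N d "6" [] (([] : List String) ++ pvGo (d + 1) N "8") _ h6,
    pvLoopB_nil]
  simp

theorem pv_alt_perm (N : Int) (hN : 1 ≤ N) :
    (generate_loc_phat_numbers_alt N).Perm (pvLevels ["6", "8"] N.toNat) := by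
  rw [← Multiset.coe_eq_coe]
  have h8 : PySem.Str.len "8" + (N.toNat : Int) = N + 1 := by
    rw [show PySem.Str.len "8" = 1 from by decide]; omega
  have h6 : PySem.Str.len "6" + (N.toNat : Int) = N + 1 := by
    rw [show PySem.Str.len "6" = 1 from by decide]; omega
  rw [pv_alt_eq N hN]
  rw [show N.toNat + 1 = N.toNat + 0 + 1 from rfl]
  rw [show (["6", "8"] : List String) = ["6"] ++ ["8"] from rfl, pvLevels_append_mult,
    ← Multiset.coe_add, pvGo_mult N N.toNat 0 "8" h8, pvGo_mult N N.toNat 0 "6" h6, add_comm]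

theorem pv_alt_desc (N : Int) (hN : 1 ≤ N) :
    (generate_loc_phat_numbers_alt N).Pairwise (fun a b => b < a) := by
  have h8 : PySem.Str.len "8" + (N.toNat : Int) = N + 1 := by
    rw [show PySem.Str.len "8" = 1 from by decide]; omega
  have h6 : PySem.Str.len "6" + (N.toNat : Int) = N + 1 := by
    rw [show PySem.Str.len "6" = 1 from by decide]; omega
  rw [pv_alt_eq N hN, show N.toNat + 1 = N.toNat + 0 + 1 from rfl]
  rw [List.pairwise_append]
  refine ⟨pvGo_desc N N.toNat 0 "8" h8, pvGo_desc N N.toNat 0 "6" h6, ?_⟩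
  intro a ha b hb
  obtain ⟨w, hw⟩ := pvGo_prefix N N.toNat 0 "8" h8 a ha
  obtain ⟨u, hu⟩ := pvGo_prefix N N.toNat 0 "6" h6 b hb
  rw [show ("8" : String).toList = ['8'] from by decide] at hw
  rw [show ("6" : String).toList = ['6'] from by decide] at hu
  exact pv_str_lt_68 "" b a u w (by simpa using hu) (by simpa using hw)

-- ===== VERDICT (by name: the statement is the Claim_ definition above) =====
theorem generate_loc_phat_numbers_spec : Claim_equal_generate_loc_phat_numbers := by
  intro N _
  show generate_loc_phat_numbers N = generate_loc_phat_numbers_alt N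
  by_cases hN : 1 ≤ N
  · rw [generate_loc_phat_numbers, pvLoopA_pos N hN]
    exact PySem.List.sorted_rev_eq_of_perm_of_pairwise_gt _ _ _ (pv_alt_perm N hN) (pv_alt_desc N hN)
  · have hN' : N ≤ 0 := by omega
    rw [generate_loc_phat_numbers, pvLoopA_nonpos N hN']
    have halt : generate_loc_phat_numbers_alt N = [] := by
      show pvLoopB N (2 ^ (N + 3).toNat) [("8", false), ("6", false)] [] = []
      have hskip : ∀ (f : Nat) (st : List (String × Bool)),
          pvLoopB N (f + 1) (("6", false) :: st) [] = pvLoopB N f st [] := by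
        intro f st
        show (if false = true then _ else if PySem.Str.len "6" ≤ N then _ else pvLoopB N f st []) = _
        rw [if_neg (by simp), if_neg (by rw [show PySem.Str.len "6" = 1 from by decide]; omega)]
      have hskip8 : ∀ (f : Nat) (st : List (String × Bool)),
          pvLoopB N (f + 1) (("8", false) :: st) [] = pvLoopB N f st [] := by
        intro f st
        show (if false = true then _ else if PySem.Str.len "8" ≤ N then _ else pvLoopB N f st []) = _
        rw [if_neg (by simp), if_neg (by rw [show PySem.Str.len "8" = 1 from by decide]; omega)]
      cases hf : (2 : Nat) ^ (N + 3).toNat with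
      | zero => rfl
      | succ f =>
          rw [hskip8]
          cases f with
          | zero => rfl
          | succ f' => rw [hskip, pvLoopB_nil]
    rw [halt, PySem.List.sorted_eq_nil_iff]
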